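-- pv_equiv track=rewrite | github.com/Ynadroid/AdventOfCode | adventofcode_day11.py | checkPasswordRule1
-- ===== SOURCE A (Python) =====
-- def checkPasswordRule1(array):
-- 	pos = 0
-- 	while pos < len(array)-2:
-- 		if array[pos+2] - array[pos+1] == 1 and array[pos+1] - array[pos] == 1:
-- 			return True
-- 		else:
-- 			pos += 1
-- 	return False
-- ===== SOURCE B (Python) =====
-- def checkPasswordRule1(array):
--     run = 0
--     for i in range(1, len(array)):
--         if array[i] - array[i-1] == 1:
--             run += 1
--             if run >= 2:
--                 return True
--         else:
--             run = 0
--     return False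
-- ===== Notes on version B (the rewrite author's own statement) =====
-- stated objective: alternative
-- what changed: B replaces A's fixed two-difference window test at each position with a single pass over adjacent differences maintaining a run-length counter of consecutive +1 steps, returning True once the run reaches 2.
import Mathlib
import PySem

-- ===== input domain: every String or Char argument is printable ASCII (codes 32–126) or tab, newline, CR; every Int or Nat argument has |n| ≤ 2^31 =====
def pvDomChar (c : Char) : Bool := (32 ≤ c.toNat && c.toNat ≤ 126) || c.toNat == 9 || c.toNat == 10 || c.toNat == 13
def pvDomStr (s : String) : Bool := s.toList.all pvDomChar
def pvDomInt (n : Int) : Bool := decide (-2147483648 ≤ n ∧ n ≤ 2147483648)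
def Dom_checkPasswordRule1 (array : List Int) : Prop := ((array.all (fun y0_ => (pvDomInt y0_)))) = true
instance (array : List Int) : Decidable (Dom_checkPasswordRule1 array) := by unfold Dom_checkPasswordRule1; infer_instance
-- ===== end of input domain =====

-- B replaces A's fixed two-difference window test at each position with a single pass
-- maintaining a run counter of consecutive +1 differences (objective: alternative decomposition).

-- ===== PORT A =====
-- while loop over pos; indices pos, pos+1, pos+2 are always in range when the guard holds,
-- so Python indexing is rendered as getElem?.getD (the default is never used inside the guard).
def aWhileLoop (array : List Int) (pos : Nat) : Bool :=
  if (pos : Int) < (array.length : Int) - 2 then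
    if (array[pos+2]?.getD 0 - array[pos+1]?.getD 0 == 1)
        && (array[pos+1]?.getD 0 - array[pos]?.getD 0 == 1) then
      true
    else
      aWhileLoop array (pos + 1)
  else
    false
termination_by array.length - pos
decreasing_by omega

def checkPasswordRule1 (array : List Int) : Bool :=
  aWhileLoop array 0

-- ===== PORT B =====
-- run-length pass: prev is array[i-1], run counts consecutive +1 differences so far.
def bRunLoop (prev : Int) (rest : List Int) (run : Nat) : Bool :=
  match rest with
  | [] => false
  | x :: xs =>
    if x - prev == 1 then
      if run + 1 ≥ 2 then true else bRunLoop x xs (run + 1)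
    else
      bRunLoop x xs 0

def checkPasswordRule1_alt (array : List Int) : Bool :=
  match array with
  | [] => false
  | x :: xs => bRunLoop x xs 0

-- ===== PRECONDITION & SPEC =====
def Spec_checkPasswordRule1 (array : List Int) (out : Bool) : Prop := out = checkPasswordRule1_alt array
instance (array : List Int) (out : Bool) : Decidable (Spec_checkPasswordRule1 array out) := by unfold Spec_checkPasswordRule1; infer_instance

-- ===== CLAIM (what is proved, stated in full; the proofs are below) =====
def Claim_equal_checkPasswordRule1 : Prop := ∀ (array : List Int), Dom_checkPasswordRule1 array → Spec_checkPasswordRule1 array (checkPasswordRule1 array)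

-- ===== LEMMAS AND PROOFS =====

-- reference characterisation: "some window of three consecutive elements increments by 1 twice"
def hasTriple : List Int → Bool
  | x :: y :: z :: rest => ((z - y == 1) && (y - x == 1)) || hasTriple (y :: z :: rest)
  | _ => false

lemma aLoop_eq_hasTriple (array : List Int) (pos : Nat) :
    aWhileLoop array pos = hasTriple (array.drop pos) := by
  fun_induction aWhileLoop array pos with
  | case1 pos h hc =>
    -- guard holds and window matches
    have hlen : pos + 2 < array.length := by
      have := h; omega
    rw [List.drop_eq_getElem_cons (by omega : pos < array.length),
        List.drop_eq_getElem_cons (by omega : pos + 1 < array.length),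
        List.drop_eq_getElem_cons (by omega : pos + 2 < array.length)]
    simp only [hasTriple]
    simp only [List.getElem?_eq_getElem hlen,
      List.getElem?_eq_getElem (by omega : pos + 1 < array.length),
      List.getElem?_eq_getElem (by omega : pos < array.length), Option.getD_some] at hc
    simp [hc]
  | case2 pos h hc ih =>
    have hlen : pos + 2 < array.length := by
      have := h; omega
    rw [List.drop_eq_getElem_cons (by omega : pos < array.length),
        List.drop_eq_getElem_cons (by omega : pos + 1 < array.length),
        List.drop_eq_getElem_cons (by omega : pos + 2 < array.length)]
    simp only [hasTriple]
    simp only [List.getElem?_eq_getElem hlen,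
      List.getElem?_eq_getElem (by omega : pos + 1 < array.length),
      List.getElem?_eq_getElem (by omega : pos < array.length), Option.getD_some] at hc
    rw [ih]
    rw [show array.drop (pos + 1) = array[pos+1] :: array[pos+2] :: array.drop (pos+3) from by
      rw [List.drop_eq_getElem_cons (by omega : pos + 1 < array.length),
          List.drop_eq_getElem_cons (by omega : pos + 2 < array.length)]]
    simp [hc]
  | case3 pos h =>
    -- guard fails: fewer than three elements remain from pos
    have hlen : array.length ≤ pos + 2 := by omega
    match hd : array.drop pos with
    | [] => simp [hasTriple]
    | [a] => simp [hasTriple]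
    | [a, b] => simp [hasTriple]
    | a :: b :: c :: rest =>
      exfalso
      have := List.length_drop (l := array) (i := pos)
      rw [hd] at this
      simp at this
      omega

lemma bLoop_spec (xs : List Int) : ∀ x : Int,
    bRunLoop x xs 0 = hasTriple (x :: xs) ∧
    bRunLoop x xs 1 =
      ((xs.head?.elim false (fun w => w - x == 1)) || hasTriple (x :: xs)) := by
  induction xs with
  | nil => intro x; simp [bRunLoop, hasTriple]
  | cons w ws ih =>
    intro x
    match ws with
    | [] =>
      simp [bRunLoop, hasTriple, beq_iff_eq] <;> rfl
    | z :: zs =>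
      obtain ⟨ih0, ih1⟩ := ih w
      constructor
      · show (if w - x == 1 then bRunLoop w (z :: zs) 1
              else bRunLoop w (z :: zs) 0) = _
        by_cases hwx : w - x = 1
        · simp only [hwx]
          rw [if_pos (by simp)]
          rw [ih1]
          simp [hasTriple, hwx, Bool.or_comm]
        · rw [if_neg (by simpa using hwx)]
          rw [ih0]
          simp [hasTriple, show (w - x == 1) = false from by simpa using hwx]
      · show (if w - x == 1 then true else bRunLoop w (z :: zs) 0) = _
        by_cases hwx : w - x = 1
        · simp [hwx]
        · rw [if_neg (by simpa using hwx)]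
          rw [ih0]
          simp [hasTriple, show (w - x == 1) = false from by simpa using hwx]

lemma alt_eq_hasTriple (array : List Int) :
    checkPasswordRule1_alt array = hasTriple array := by
  match array with
  | [] => simp [checkPasswordRule1_alt, hasTriple]
  | x :: xs =>
    show bRunLoop x xs 0 = _
    exact (bLoop_spec xs x).1

-- ===== VERDICT (by name: the statement is the Claim_ definition above) =====
theorem checkPasswordRule1_spec : Claim_equal_checkPasswordRule1 := by
  intro array _
  unfold Spec_checkPasswordRule1
  rw [alt_eq_hasTriple, checkPasswordRule1, aLoop_eq_hasTriple]
  simp
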